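-- pv_equiv track=rewrite | github.com/jonhehir/acsbm | src/acsbm/utils.py | tuple_id
-- ===== SOURCE A (Python) =====
-- from typing import Iterable
--
-- def tuple_id(t: Iterable[int], levels: Iterable[int]) -> int:
--     """
--     A bijection that maps a tuple of ints to a scalar integer
--     Example with levels = (2, 3):
--     (0, 0) -> 0
--     (0, 1) -> 1
--     (0, 2) -> 2
--     (1, 0) -> 3
--     (1, 1) -> 4
--     (1, 2) -> 5
--     """
--     values = list(t)
--     multiplier = 0
--     for i in reversed(range(len(values))):
--         if multiplier > 0:
--             values[i] *= multiplier
--         multiplier += levels[i]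
--
--     return sum(values)
-- ===== SOURCE B (Python) =====
-- def tuple_id(t, levels):
--     """
--     Same encoding, computed forward: the weight of position i is the total
--     of the first n levels minus the running prefix sum through i (suffix
--     sum by subtraction), with coefficient 1 when that weight is not > 0.
--     """
--     values = list(t)
--     n = len(values)
--     total = 0
--     for i in range(n):
--         total += levels[i]
--     result = 0
--     prefix = 0
--     for i in range(n):
--         prefix += levels[i]
--         c = total - prefix
--         result += values[i] * (c if c > 0 else 1)
--     return result
-- ===== Notes on version B (the rewrite author's own statement) =====
-- stated objective: alternative
-- what changed: A walks the tuple in reverse, mutating values in place while accumulating a suffix-sum multiplier; B never reverses or mutates: it computes the total of the used levels once, then in a forward pass derives each coefficient as total minus the running prefix sum and accumulates the weighted sum.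
import Mathlib
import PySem

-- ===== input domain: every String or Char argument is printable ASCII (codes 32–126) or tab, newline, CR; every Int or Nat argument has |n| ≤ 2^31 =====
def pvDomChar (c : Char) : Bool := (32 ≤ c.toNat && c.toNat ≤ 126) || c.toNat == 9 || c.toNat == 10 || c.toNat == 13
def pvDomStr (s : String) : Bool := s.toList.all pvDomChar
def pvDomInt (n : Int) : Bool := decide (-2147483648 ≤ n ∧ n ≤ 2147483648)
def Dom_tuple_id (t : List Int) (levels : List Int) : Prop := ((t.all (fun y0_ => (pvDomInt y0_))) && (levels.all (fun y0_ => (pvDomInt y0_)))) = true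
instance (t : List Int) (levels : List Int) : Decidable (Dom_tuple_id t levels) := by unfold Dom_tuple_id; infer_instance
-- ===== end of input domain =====

-- B replaces A's reversed in-place suffix-accumulation loop by two forward passes:
-- total of the used levels once, then coefficient = total - prefix sum (alternative decomposition; return value only).


-- ===== PORT A =====
-- one step of A's loop body at index i (indices are the nonnegative i of
-- 'reversed(range(len(values)))', so plain [i]? equals Python indexing; the
-- getD 0 fallback is unreachable under Pre_ / for values since i < length)
def tupleStep (levels : List Int) (st : List Int × Int) (i : Nat) : List Int × Int :=
  let values := if st.2 > 0 then st.1.set i ((st.1[i]?.getD 0) * st.2) else st.1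
  (values, st.2 + (levels[i]?.getD 0))

def tuple_id (t : List Int) (levels : List Int) : Int :=
  (((List.range t.length).reverse.foldl (tupleStep levels) (t, 0)).1).sum

-- ===== PORT B =====
-- two forward passes: 'total' of the first n levels, then a running prefix sum,
-- coefficient at i being total - prefix (getD 0 unreachable under Pre_)
def tuple_id_alt (t : List Int) (levels : List Int) : Int :=
  let n := t.length
  let total := (List.range n).foldl (fun acc i => acc + levels[i]?.getD 0) 0
  let pr := (List.range n).foldl (fun (st : Int × Int) i =>
      let pfx := st.2 + levels[i]?.getD 0
      let c := total - pfx
      (st.1 + (t[i]?.getD 0) * (if c > 0 then c else 1), pfx)) (0, 0)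
  pr.1

-- ===== PRECONDITION & SPEC =====
-- A indexes levels[i] for every i < len(t): it raises IndexError exactly when
-- levels is shorter than t. Pre_ admits exactly the inputs where A returns.
def Pre_tuple_id (t : List Int) (levels : List Int) : Prop := t.length ≤ levels.length
instance (t : List Int) (levels : List Int) : Decidable (Pre_tuple_id t levels) := by unfold Pre_tuple_id; infer_instance
def pvWitness_tuple_id : List Int × List Int := ([1, 2], [2, 3])

def Spec_tuple_id (t : List Int) (levels : List Int) (out : Int) : Prop := out = tuple_id_alt t levels
instance (t : List Int) (levels : List Int) (out : Int) : Decidable (Spec_tuple_id t levels out) := by unfold Spec_tuple_id; infer_instance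

-- ===== CLAIM (what is proved, stated in full; the proofs are below) =====
def Claim_equal_tuple_id : Prop := ∀ (t : List Int) (levels : List Int), Dom_tuple_id t levels → Pre_tuple_id t levels → Spec_tuple_id t levels (tuple_id t levels)

-- ===== LEMMAS AND PROOFS =====

-- the suffix-sum list: sufRev m xs = [m, m+xs[0], m+xs[0]+xs[1], …] (over reversed levels)
def sufRev (m : Int) : List Int → List Int
  | [] => []
  | lv :: rest => m :: sufRev (m + lv) rest

lemma sufRev_length (xs : List Int) : ∀ m : Int, (sufRev m xs).length = xs.length := by
  induction xs with
  | nil => intro m; rfl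
  | cons lv rest ih => intro m; simp [sufRev, ih]

def comb (a b : Int) : Int := if b > 0 then a * b else a

-- characterisation of A's loop: positions < k get multiplied by their suffix sum
lemma loop_char (levels : List Int) : ∀ (k : Nat) (v : List Int) (m : Int),
    k ≤ v.length → k ≤ levels.length →
    ((List.range k).reverse.foldl (tupleStep levels) (v, m)).1
      = List.zipWith comb (v.take k) ((sufRev m ((levels.take k).reverse)).reverse) ++ v.drop k := by
  intro k
  induction k with
  | zero => intro v m _ _; simp [sufRev]
  | succ k ih =>
      intro v m hv hl
      have hkv : k < v.length := by omega
      have hkl : k < levels.length := by omega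
      have hrange : (List.range (k + 1)).reverse = k :: (List.range k).reverse := by
        rw [List.range_succ, List.reverse_append]; rfl
      rw [hrange, List.foldl_cons]
      have htakeL : levels.take (k + 1) = levels.take k ++ [levels[k]] := by
        rw [List.take_add_one]; simp [List.getElem?_eq_getElem hkl]
      have htakeV : v.take (k + 1) = v.take k ++ [v[k]] := by
        rw [List.take_add_one]; simp [List.getElem?_eq_getElem hkv]
      have hS : (sufRev m ((levels.take (k + 1)).reverse)).reverse
          = (sufRev (m + levels[k]) ((levels.take k).reverse)).reverse ++ [m] := by
        rw [htakeL, List.reverse_append]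
        simp [sufRev]
      have hlenS : ((sufRev (m + levels[k]) ((levels.take k).reverse)).reverse).length = k := by
        simp [sufRev_length]; omega
      have hlenT : (v.take k).length = k := by simp; omega
      have hzip : List.zipWith comb (v.take (k + 1)) ((sufRev m ((levels.take (k+1)).reverse)).reverse)
          = List.zipWith comb (v.take k) ((sufRev (m + levels[k]) ((levels.take k).reverse)).reverse)
            ++ [comb v[k] m] := by
        rw [htakeV, hS, List.zipWith_append (by rw [hlenT, hlenS])]
        rfl
      rw [hzip]
      have hstep : tupleStep levels (v, m) k
          = (if m > 0 then v.set k (v[k] * m) else v, m + levels[k]) := by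
        simp [tupleStep, List.getElem?_eq_getElem hkv, List.getElem?_eq_getElem hkl]
      rw [hstep]
      by_cases hm : m > 0
      · rw [if_pos hm]
        rw [ih (v.set k (v[k] * m)) (m + levels[k]) (by simp; omega) (by omega)]
        have h1 : (v.set k (v[k] * m)).take k = v.take k := by
          rw [List.take_set]; exact List.set_eq_of_length_le (by simp)
        have h2 : (v.set k (v[k] * m)).drop k = v[k] * m :: v.drop (k + 1) := by
          rw [List.drop_eq_getElem_cons (by simp; omega)]
          simp [List.drop_set]
        rw [h1, h2]
        have hc : comb v[k] m = v[k] * m := by simp [comb, hm]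
        rw [hc, List.append_assoc]
        rfl
      · rw [if_neg hm]
        rw [ih v (m + levels[k]) (by omega) (by omega)]
        have h2 : v.drop k = v[k] :: v.drop (k + 1) := List.drop_eq_getElem_cons hkv
        have hc : comb v[k] m = v[k] := by simp [comb, hm]
        rw [h2, hc, List.append_assoc]
        rfl

-- mathematical reference value: weight of the head is the sum of the remaining levels
def refSum : List Int → List Int → Int
  | [], _ => 0
  | _ :: _, [] => 0
  | v :: vs, _ :: ls => comb v (ls.take vs.length).sum + refSum vs ls

lemma sufRev_append_singleton (xs : List Int) : ∀ (m a : Int),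
    sufRev m (xs ++ [a]) = sufRev m xs ++ [m + xs.sum] := by
  induction xs with
  | nil => intro m a; simp [sufRev]
  | cons x xs ih =>
      intro m a
      simp only [List.cons_append, sufRev, ih, List.sum_cons, add_assoc]

-- A-side sum equals refSum (lists of equal length)
lemma zip_sufRev_eq_refSum : ∀ (vs ls : List Int), vs.length = ls.length →
    (List.zipWith comb vs ((sufRev 0 ls.reverse).reverse)).sum = refSum vs ls := by
  intro vs
  induction vs with
  | nil => intro ls _; simp [refSum]
  | cons v vs ih =>
      intro ls h
      cases ls with
      | nil => simp at h
      | cons l ls =>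
          have hlen : vs.length = ls.length := by simpa using h
          have hrev : (l :: ls).reverse = ls.reverse ++ [l] := by simp
          rw [hrev, sufRev_append_singleton, List.reverse_append]
          simp only [List.reverse_cons, List.reverse_nil, List.nil_append, List.singleton_append,
            List.zipWith_cons_cons, List.sum_cons, zero_add, List.sum_reverse]
          rw [ih ls hlen]
          show comb v ls.sum + refSum vs ls = refSum (v :: vs) (l :: ls)
          rw [refSum, List.take_of_length_le (by omega)]

-- B's indexed combining fold over range n is a fold over the zipped prefixes
lemma bmain (t ls : List Int) (T : Int) :
    ∀ (n : Nat) (init : Int × Int), n ≤ t.length → n ≤ ls.length →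
    (List.range n).foldl (fun (st : Int × Int) i =>
        (st.1 + (t[i]?.getD 0) * (if T - (st.2 + ls[i]?.getD 0) > 0 then T - (st.2 + ls[i]?.getD 0) else 1),
          st.2 + ls[i]?.getD 0)) init
      = ((t.take n).zip (ls.take n)).foldl (fun (st : Int × Int) q =>
        (st.1 + q.1 * (if T - (st.2 + q.2) > 0 then T - (st.2 + q.2) else 1), st.2 + q.2)) init := by
  intro n
  induction n with
  | zero => intro init _ _; simp
  | succ n ih =>
      intro init ht hl
      have hnt : n < t.length := by omega
      have hnl : n < ls.length := by omega
      rw [List.range_succ, List.foldl_append, ih init (by omega) (by omega)]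
      have h1 : t.take (n + 1) = t.take n ++ [t[n]] := by
        rw [List.take_add_one]; simp [List.getElem?_eq_getElem hnt]
      have h2 : ls.take (n + 1) = ls.take n ++ [ls[n]] := by
        rw [List.take_add_one]; simp [List.getElem?_eq_getElem hnl]
      have hz : (t.take (n + 1)).zip (ls.take (n + 1))
          = (t.take n).zip (ls.take n) ++ [(t[n], ls[n])] := by
        rw [h1, h2, List.zip_append (by simp; omega)]
        rfl
      rw [hz, List.foldl_append]
      simp [List.getElem?_eq_getElem hnt, List.getElem?_eq_getElem hnl]

lemma range_foldl_sum (ls : List Int) : ∀ (n : Nat) (a : Int), n ≤ ls.length →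
    (List.range n).foldl (fun acc i => acc + ls[i]?.getD 0) a = a + (ls.take n).sum := by
  intro n
  induction n with
  | zero => intro a _; simp
  | succ n ih =>
      intro a h
      have hn : n < ls.length := by omega
      rw [List.range_succ, List.foldl_append, ih a (by omega)]
      have : ls.take (n + 1) = ls.take n ++ [ls[n]] := by
        rw [List.take_add_one]; simp [List.getElem?_eq_getElem hn]
      rw [this]
      simp only [List.foldl_cons, List.foldl_nil, List.sum_append, List.sum_cons, List.sum_nil,
        List.getElem?_eq_getElem hn, Option.getD_some]
      ring

-- B's combining fold equals refSum: the running prefix plus the remaining levels is T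
lemma bzip (T : Int) : ∀ (vs ls : List Int) (acc p : Int),
    vs.length ≤ ls.length → T = p + (ls.take vs.length).sum →
    ((vs.zip ls).foldl (fun (st : Int × Int) q =>
        (st.1 + q.1 * (if T - (st.2 + q.2) > 0 then T - (st.2 + q.2) else 1), st.2 + q.2))
      (acc, p)).1 = acc + refSum vs ls := by
  intro vs
  induction vs with
  | nil => intro ls acc p _ _; simp [refSum]
  | cons v vs ih =>
      intro ls acc p hlen hT
      cases ls with
      | nil => simp at hlen
      | cons l ls =>
          rw [List.zip_cons_cons, List.foldl_cons]
          have hs : T - (p + l) = (ls.take vs.length).sum := by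
            simp at hT
            omega
          rw [ih ls _ (p + l) (by simpa using hlen) (by omega)]
          rw [hs]
          have hc : v * (if (ls.take vs.length).sum > 0 then (ls.take vs.length).sum else 1)
              = comb v (ls.take vs.length).sum := by
            simp only [comb]; split <;> simp
          rw [hc]
          simp [refSum]
          ring

-- ===== VERDICT (by name: the statement is the Claim_ definition above) =====
theorem tuple_id_spec : Claim_equal_tuple_id := by
  intro t levels _ hpre
  unfold Spec_tuple_id tuple_id tuple_id_alt
  have hn : t.length ≤ levels.length := hpre
  dsimp only
  rw [loop_char levels t.length t 0 le_rfl hn]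
  simp only [List.take_length, List.drop_length, List.append_nil]
  rw [zip_sufRev_eq_refSum t (levels.take t.length) (by simp; omega)]
  rw [range_foldl_sum levels t.length 0 hn, zero_add]
  rw [bmain t levels ((levels.take t.length).sum) t.length (0, 0) le_rfl hn]
  rw [List.take_length]
  rw [bzip ((levels.take t.length).sum) t (levels.take t.length) 0 0 (by simp; omega)
      (by simp [List.take_take])]
  rw [zero_add]
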